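-- pv_equiv track=rewrite | github.com/Manonedde/MRI_RTDoc_flow | plots/three_dimension.py | create_z_grid
-- ===== SOURCE A (Python) =====
-- import itertools
--
-- def create_z_grid(len_x, len_y, z_df):
--     z_temp_df = []
--
--     for x, y in itertools.product(range(len_x), range(len_y)):
--         if x == y:
--             z_temp_df.append(z_df[x])
--         else:
--             z_temp_df.append(None)
--     return z_temp_df
-- ===== SOURCE B (Python) =====
-- def create_z_grid(len_x, len_y, z_df):
--     rows, cols = max(len_x, 0), max(len_y, 0)
--     grid = [None] * (rows * cols)
--     for i in range(min(rows, cols)):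
--         grid[i * cols + i] = z_df[i]
--     return grid
-- ===== Notes on version B (the rewrite author's own statement) =====
-- stated objective: simpler
-- what changed: B allocates the whole len_x*len_y grid as None at once and scatters only the min(len_x,len_y) diagonal entries, instead of A's nested itertools.product loop testing x==y on every cell.
import Mathlib
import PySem

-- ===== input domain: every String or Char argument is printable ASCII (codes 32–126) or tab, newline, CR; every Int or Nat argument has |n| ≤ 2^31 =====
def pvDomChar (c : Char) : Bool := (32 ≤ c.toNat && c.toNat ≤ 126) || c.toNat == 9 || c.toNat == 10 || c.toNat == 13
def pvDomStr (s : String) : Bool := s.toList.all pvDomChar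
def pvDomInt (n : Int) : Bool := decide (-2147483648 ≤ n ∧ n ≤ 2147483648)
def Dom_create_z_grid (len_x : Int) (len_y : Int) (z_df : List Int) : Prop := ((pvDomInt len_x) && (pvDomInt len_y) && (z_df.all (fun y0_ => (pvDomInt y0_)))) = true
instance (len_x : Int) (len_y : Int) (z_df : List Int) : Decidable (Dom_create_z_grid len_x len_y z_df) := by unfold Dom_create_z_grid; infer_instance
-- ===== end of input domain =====

-- B replaces A's nested product loop (branching on x == y at every cell) by allocating the
-- whole grid as None and scattering only the diagonal entries; return values agree wherever A returns.

-- ===== PORT A =====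
-- for x, y in itertools.product(range(len_x), range(len_y)): if x == y: append(z_df[x]) else: append(None)
def create_z_grid (len_x : Int) (len_y : Int) (z_df : List Int) : List (Option Int) :=
  ((PySem.List.pyRange 0 len_x 1).flatMap (fun x =>
      (PySem.List.pyRange 0 len_y 1).map (fun y => (x, y)))).foldl
    (fun acc xy =>
      if xy.1 == xy.2 then acc ++ [PySem.List.pyGet? z_df xy.1] else acc ++ [none]) []

-- ===== PORT B =====
-- grid = [None]*(rows*cols); for i in range(min(rows, cols)): grid[i*cols+i] = z_df[i]
def create_z_grid_alt (len_x : Int) (len_y : Int) (z_df : List Int) : List (Option Int) :=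
  let rows := max len_x 0
  let cols := max len_y 0
  let grid := List.replicate (rows * cols).toNat (none : Option Int)
  (PySem.List.pyRange 0 (min rows cols) 1).foldl
    (fun g i => PySem.List.pySetD g (i * cols + i) (PySem.List.pyGet? z_df i)) grid

-- ===== PRECONDITION & SPEC =====
-- A (and B alike) raises IndexError exactly when some diagonal index reaches past z_df,
-- i.e. when min(len_x, len_y) > len(z_df); Pre_ excludes exactly those inputs.
def Pre_create_z_grid (len_x : Int) (len_y : Int) (z_df : List Int) : Prop :=
  min len_x len_y ≤ (z_df.length : Int)
instance (len_x : Int) (len_y : Int) (z_df : List Int) : Decidable (Pre_create_z_grid len_x len_y z_df) := by unfold Pre_create_z_grid; infer_instance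

def pvWitness_create_z_grid : Int × Int × List Int := (2, 3, [5, 6])

def Spec_create_z_grid (len_x : Int) (len_y : Int) (z_df : List Int) (out : List (Option Int)) : Prop := out = create_z_grid_alt len_x len_y z_df
instance (len_x : Int) (len_y : Int) (z_df : List Int) (out : List (Option Int)) : Decidable (Spec_create_z_grid len_x len_y z_df out) := by unfold Spec_create_z_grid; infer_instance

-- ===== CLAIM (what is proved, stated in full; the proofs are below) =====
def Claim_equal_create_z_grid : Prop := ∀ (len_x : Int) (len_y : Int) (z_df : List Int), Dom_create_z_grid len_x len_y z_df → Pre_create_z_grid len_x len_y z_df → Spec_create_z_grid len_x len_y z_df (create_z_grid len_x len_y z_df)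

-- ===== LEMMAS AND PROOFS =====

-- Setting one position of a mapped range rewrites that position's function value.
theorem pv_set_map_range (n : ℕ) (f : ℕ → Option Int) (p : ℕ) (v : Option Int) :
    ((List.range n).map f).set p v = (List.range n).map (fun k => if k = p then v else f k) := by
  apply List.ext_getElem
  · simp
  · intro k h1 h2
    rw [List.getElem_set]
    simp only [List.getElem_map, List.getElem_range]
    by_cases hkp : p = k <;> simp [hkp, eq_comm]

-- Normal form of A's row-by-row construction: cell k of the flat grid is diagonal iff k/C = k%C.
theorem pv_A_normal (R C : ℕ) (z : List Int) :
    (List.range R).flatMap (fun x => (List.range C).map (fun y => if x = y then z[x]? else none))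
      = (List.range (R * C)).map (fun k => if k / C = k % C then z[k / C]? else none) := by
  induction R with
  | zero => simp
  | succ R ih =>
    rw [List.range_succ, List.flatMap_append, ih, Nat.succ_mul, List.range_add,
        List.map_append, List.map_map]
    congr 1
    simp only [List.flatMap_cons, List.flatMap_nil, List.append_nil]
    apply List.map_congr_left
    intro j hj
    rw [List.mem_range] at hj
    have hC : 0 < C := by omega
    have hdiv : (R * C + j) / C = R + j / C := by rw [Nat.mul_comm]; exact Nat.mul_add_div hC R j
    have hmod : (R * C + j) % C = j % C := Nat.mul_add_mod_self_right R C j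
    simp only [Function.comp, hdiv, hmod, Nat.div_eq_of_lt hj, Nat.mod_eq_of_lt hj, Nat.add_zero]

-- Normal form of B's scatter loop: after M diagonal writes, cell k is set iff it is
-- a diagonal cell with row index below M.
theorem pv_B_normal (R C : ℕ) (z : List Int) :
    ∀ (M : ℕ), M ≤ R → M ≤ C →
    (List.range M).foldl (fun g i => g.set (i * C + i) z[i]?) (List.replicate (R * C) none)
      = (List.range (R * C)).map (fun k => if k / C = k % C ∧ k / C < M then z[k / C]? else none) := by
  intro M
  induction M with
  | zero => intro _ _; simp [List.map_const']
  | succ M ih =>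
    intro hR hC
    rw [List.range_succ, List.foldl_append, List.foldl_cons, List.foldl_nil,
        ih (by omega) (by omega), pv_set_map_range]
    apply List.map_congr_left
    intro k hk
    rw [List.mem_range] at hk
    have hCpos : 0 < C := by omega
    have hkdm : C * (k / C) + k % C = k := Nat.div_add_mod k C
    by_cases hkp : k = M * C + M
    · subst hkp
      have hdiv : (M * C + M) / C = M := by
        rw [Nat.mul_comm, Nat.mul_add_div hCpos, Nat.div_eq_of_lt (by omega)]
        omega
      have hmod : (M * C + M) % C = M := by
        rw [Nat.mul_add_mod_self_right, Nat.mod_eq_of_lt (by omega)]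
      simp [hdiv, hmod]
    · rw [if_neg hkp]
      by_cases hdiag : k / C = k % C
      · have hne : k / C ≠ M := by
          intro hM2
          apply hkp
          have h1 : k % C = M := by rw [← hdiag, hM2]
          have h2 : k = C * M + M := by rw [← hkdm, hM2, h1]
          rw [h2, Nat.mul_comm]
        have hiff : (k / C = k % C ∧ k / C < M + 1) ↔ (k / C = k % C ∧ k / C < M) := by
          constructor <;> rintro ⟨ha, hb⟩ <;> exact ⟨ha, by omega⟩
        simp only [hiff]
      · simp [hdiag]

-- A's diagonal condition already implies the row index is below min R C, so the two
-- normal forms coincide.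
theorem pv_normal_eq (R C : ℕ) (z : List Int) :
    (List.range (R * C)).map (fun k => if k / C = k % C then z[k / C]? else none)
      = (List.range (R * C)).map (fun k => if k / C = k % C ∧ k / C < min R C then z[k / C]? else none) := by
  apply List.map_congr_left
  intro k hk
  rw [List.mem_range] at hk
  have hCpos : 0 < C := by
    rcases Nat.eq_zero_or_pos C with h | h
    · subst h; simp at hk
    · exact h
  have h1 : k / C < R := (Nat.div_lt_iff_lt_mul hCpos).mpr hk
  have h2 : k % C < C := Nat.mod_lt _ hCpos
  have hiff : (k / C = k % C ∧ k / C < min R C) ↔ (k / C = k % C) := by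
    constructor
    · rintro ⟨ha, _⟩; exact ha
    · intro ha; exact ⟨ha, by omega⟩
  simp only [hiff]

-- A's port in Nat-range normal form.
theorem pv_A_eq (len_x len_y : Int) (z : List Int) :
    create_z_grid len_x len_y z
      = (List.range (len_x.toNat * len_y.toNat)).map
          (fun k => if k / len_y.toNat = k % len_y.toNat then z[k / len_y.toNat]? else none) := by
  unfold create_z_grid
  have hfun : (fun (acc : List (Option Int)) (xy : Int × Int) =>
      if xy.1 == xy.2 then acc ++ [PySem.List.pyGet? z xy.1] else acc ++ [none])
        = fun acc xy => acc ++ [if xy.1 == xy.2 then PySem.List.pyGet? z xy.1 else none] := by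
    funext acc xy
    by_cases h : (xy.1 == xy.2) = true <;> simp [h]
  rw [hfun, PySem.List.foldl_append_singleton_eq_map, List.nil_append, List.map_flatMap]
  rw [← pv_A_normal len_x.toNat len_y.toNat z]
  rw [PySem.List.pyRange_one 0 len_x, PySem.List.pyRange_one 0 len_y]
  simp only [Int.sub_zero, List.flatMap_map, List.map_map]
  apply List.flatMap_congr
  intro x _
  apply List.map_congr_left
  intro y _
  simp only [Function.comp]
  by_cases h : x = y
  · simp [h]
  · simp [h]

-- B's port in the same normal form (M = min of the clamped dimensions).
theorem pv_B_eq (len_x len_y : Int) (z : List Int) :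
    create_z_grid_alt len_x len_y z
      = (List.range (len_x.toNat * len_y.toNat)).map
          (fun k => if k / len_y.toNat = k % len_y.toNat ∧ k / len_y.toNat < min len_x.toNat len_y.toNat
                    then z[k / len_y.toNat]? else none) := by
  simp only [create_z_grid_alt]
  have h1 : (max len_x 0).toNat = len_x.toNat := by omega
  have h2 : (max len_y 0).toNat = len_y.toNat := by omega
  have hRC : ((max len_x 0) * (max len_y 0)).toNat = len_x.toNat * len_y.toNat := by
    rw [Int.toNat_mul (le_max_right _ _) (le_max_right _ _), h1, h2]
  have hM : (min (max len_x 0) (max len_y 0) - 0).toNat = min len_x.toNat len_y.toNat := by omega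
  rw [PySem.List.pyRange_one 0 _, hM, hRC]
  rw [← pv_B_normal len_x.toNat len_y.toNat z (min len_x.toNat len_y.toNat) (by omega) (by omega)]
  rw [List.foldl_map]
  apply PySem.List.foldl_congr_mem
  intro g i hi
  have hcols : max len_y 0 = ((len_y.toNat : ℕ) : Int) := by omega
  have hcast : ((0 : Int) + (i : Int)) * (max len_y 0) + ((0 : Int) + (i : Int))
      = ((i * len_y.toNat + i : ℕ) : Int) := by
    rw [hcols]; push_cast; ring
  rw [hcast, PySem.List.pySetD_natCast]
  have hz : (0 : Int) + (i : Int) = ((i : ℕ) : Int) := by omega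
  rw [hz, PySem.List.pyGet?_natCast]

-- ===== VERDICT (by name: the statement is the Claim_ definition above) =====
theorem create_z_grid_spec : Claim_equal_create_z_grid := by
  intro len_x len_y z _ _
  unfold Spec_create_z_grid
  rw [pv_A_eq, pv_B_eq, pv_normal_eq]
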